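-- pv_equiv track=rewrite | github.com/CHANCHALCHAVHAN/Company_Problem-statement-and-its-Solutions | Teleporting Strings Through Prime Portals.py | lexicographically_largest_string
-- ===== SOURCE A (Python) =====
-- def is_prime(n):
--     """Check if a number is prime."""
--     if n < 2:
--         return False
--     for i in range(2, int(n**0.5) + 1):
--         if n % i == 0:
--             return False
--     return True
--
-- def lexicographically_largest_string(N, K, M, S, P):
--     S = list(S)  # Convert string to list for easy modification
--     prime_indices = sorted([p-1 for p in P if is_prime(p)])  # Filter only prime indices (1-based to 0-based)
--
--     if not prime_indices or M == 0:
--         return "".join(S)  # No valid teleportations possible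
--
--     # Sort characters at prime indices in descending order
--     sorted_chars = sorted([S[i] for i in prime_indices], reverse=True)
--
--     # Perform teleportations
--     for i in range(min(M, len(prime_indices))):
--         S[prime_indices[i]] = sorted_chars[i]
--
--     return "".join(S)
-- ===== SOURCE B (Python) =====
-- def lexicographically_largest_string(N, K, M, S, P):
--     n = len(S)
--     if M <= 0 or n < 2:
--         return S
--     # sieve of Eratosthenes over the only positions that can matter, 1..n
--     sieve = [True] * (n + 1)
--     sieve[0] = sieve[1] = False
--     i = 2
--     while i * i <= n:
--         if sieve[i]:
--             for j in range(i * i, n + 1, i):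
--                 sieve[j] = False
--         i += 1
--     # multiplicity of each in-range prime value of P
--     cnt = {}
--     for p in P:
--         if 2 <= p <= n and sieve[p]:
--             cnt[p] = cnt.get(p, 0) + 1
--     # single ascending scan of S: prime slots in order + 128-bucket char counts
--     idxs = []
--     bucket = [0] * 128
--     for i, ch in enumerate(S):
--         c = cnt.get(i + 1, 0)
--         if c:
--             idxs.extend([i] * c)
--             bucket[ord(ch)] += c
--     desc = []
--     for code in range(127, -1, -1):
--         desc.extend(chr(code) * bucket[code])
--     t = min(M, len(idxs))
--     repl = dict(zip(idxs[:t], desc[:t]))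
--     return "".join(repl.get(i, ch) for i, ch in enumerate(S))
-- ===== Notes on version B (the rewrite author's own statement) =====
-- stated objective: alternative
-- what changed: B replaces per-element trial division by one sieve of Eratosthenes over positions 1..len(S), replaces both comparison sorts by a single ascending scan of the string (prime slots come out already sorted) plus a 128-bucket counting sort of the selected characters, and builds the output in one pass from a dict(zip(...)) overlay instead of index-by-index mutation.
import Mathlib
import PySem

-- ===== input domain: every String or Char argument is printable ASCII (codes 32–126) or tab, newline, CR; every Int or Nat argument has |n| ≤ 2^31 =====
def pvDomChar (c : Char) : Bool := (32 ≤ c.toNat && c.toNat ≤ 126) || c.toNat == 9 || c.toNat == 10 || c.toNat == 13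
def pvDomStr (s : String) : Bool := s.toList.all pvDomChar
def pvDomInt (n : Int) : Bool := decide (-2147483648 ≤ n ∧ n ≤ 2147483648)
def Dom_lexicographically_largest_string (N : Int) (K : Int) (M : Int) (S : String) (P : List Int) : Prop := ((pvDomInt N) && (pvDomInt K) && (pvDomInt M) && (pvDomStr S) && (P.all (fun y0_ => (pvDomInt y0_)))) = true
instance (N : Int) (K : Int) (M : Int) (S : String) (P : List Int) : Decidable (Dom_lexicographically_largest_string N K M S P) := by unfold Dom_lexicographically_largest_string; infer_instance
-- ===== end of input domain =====

-- B replaces A's per-element trial division by a sieve of Eratosthenes over positions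
-- 1..len(S), replaces A's two comparison sorts by one ascending scan of the string plus
-- a 128-bucket counting sort, and builds the output from a dict(zip(...)) overlay
-- (objective: alternative algorithm; return value proved equal on Pre_).

-- ===== PORT A =====
-- int(n**0.5) ported as Nat.sqrt: exact for 0 ≤ n ≤ 2^31 (this branch is only
-- reached when 2 ≤ n, and the double sqrt of such n truncates to the integer sqrt).
def pvSqrtInt (n : Int) : Int := (Nat.sqrt n.toNat : Int)

def pvIsPrime (n : Int) : Bool :=
  if n < 2 then false
  else !((PySem.List.pyRange 2 (pvSqrtInt n + 1) 1).any (fun i => PySem.Int.mod n i == 0))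

-- "".join(list-of-chars) is String.ofList; S[i] is pyGetD (in range under Pre_).
def lexicographically_largest_string (N : Int) (K : Int) (M : Int) (S : String) (P : List Int) : String :=
  let cs := S.toList
  let primeIdxs := PySem.List.sorted ((P.filter pvIsPrime).map (fun p => p - 1)) (fun x => x) false
  if primeIdxs = [] ∨ M = 0 then String.ofList cs
  else
    let sortedChars := PySem.List.sorted (primeIdxs.map (fun i => PySem.List.pyGetD cs i ' ')) (fun x => x) true
    let t := min M (primeIdxs.length : Int)
    String.ofList ((PySem.List.pyRange 0 t 1).foldl
      (fun acc i => PySem.List.pySetD acc (PySem.List.pyGetD primeIdxs i 0)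
        (PySem.List.pyGetD sortedChars i ' ')) cs)

-- ===== PORT B =====
-- the inner 'for j in range(i*i, n+1, i): sieve[j] = False'
def pvSieveMark (s : List Bool) (i n : Int) : List Bool :=
  (PySem.List.pyRange (i * i) (n + 1) i).foldl (fun acc j => PySem.List.pySetD acc j false) s

-- the outer 'while i*i <= n' as structural recursion on a fuel that bounds its
-- iteration count (i stays ≤ n while the guard holds, so n.toNat + 1 steps suffice);
-- the fuel only makes the same computation total.
def pvSieveLoop : Nat → List Bool → Int → Int → List Bool
  | 0, s, _, _ => s
  | fuel + 1, s, i, n =>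
    if i * i ≤ n then
      pvSieveLoop fuel (if PySem.List.pyGetD s i false then pvSieveMark s i n else s) (i + 1) n
    else s

-- one step of the 'for i, ch in enumerate(S)' scan: state = (idxs, bucket)
def pvScanStep (cnt : PySem.Dict Int Int) (acc : List Int × List Int) (q : Int × Char) : List Int × List Int :=
  let c := cnt.getD (q.1 + 1) 0
  if c ≠ 0 then
    (acc.1 ++ List.replicate c.toNat q.1,
     PySem.List.pySetD acc.2 (q.2.toNat : Int) (PySem.List.pyGetD acc.2 (q.2.toNat : Int) 0 + c))
  else acc

def lexicographically_largest_string_alt (N : Int) (K : Int) (M : Int) (S : String) (P : List Int) : String :=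
  let cs := S.toList
  let n : Int := (cs.length : Int)
  if M ≤ 0 ∨ n < 2 then S
  else
    let sieve0 := PySem.List.pySetD (PySem.List.pySetD (List.replicate (n.toNat + 1) true) 0 false) 1 false
    let sieve := pvSieveLoop (n.toNat + 1) sieve0 2 n
    let cnt := P.foldl (fun d p =>
      if 2 ≤ p ∧ p ≤ n ∧ PySem.List.pyGetD sieve p false then d.insert p (d.getD p 0 + 1) else d)
      (PySem.Dict.empty : PySem.Dict Int Int)
    let scan := (PySem.List.enumerate cs 0).foldl (pvScanStep cnt) ([], List.replicate 128 0)
    let desc := (PySem.List.pyRange 127 (-1) (-1)).foldl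
      (fun acc code => acc ++ List.replicate (PySem.List.pyGetD scan.2 code 0).toNat (Char.ofNat code.toNat)) []
    let t := min M (scan.1.length : Int)
    let repl := ((PySem.List.slice scan.1 none (some t)).zip (PySem.List.slice desc none (some t))).foldl
      (fun d q => d.insert q.1 q.2) (PySem.Dict.empty : PySem.Dict Int Char)
    String.ofList ((PySem.List.enumerate cs 0).map fun p => repl.getD p.1 p.2)

-- ===== PRECONDITION & SPEC =====
-- Pre_ excludes exactly the inputs where A raises IndexError: M ≠ 0 together with a
-- prime p in P whose 0-based index p-1 falls outside S.
def Pre_lexicographically_largest_string (N : Int) (K : Int) (M : Int) (S : String) (P : List Int) : Prop :=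
  M = 0 ∨ ∀ p ∈ P, p.toNat.Prime → p ≤ (S.toList.length : Int)
instance (N : Int) (K : Int) (M : Int) (S : String) (P : List Int) : Decidable (Pre_lexicographically_largest_string N K M S P) := by unfold Pre_lexicographically_largest_string; infer_instance
def pvWitness_lexicographically_largest_string : Int × Int × Int × String × List Int := (0, 0, 2, "abc", [2, 3])

def Spec_lexicographically_largest_string (N : Int) (K : Int) (M : Int) (S : String) (P : List Int) (out : String) : Prop := out = lexicographically_largest_string_alt N K M S P
instance (N : Int) (K : Int) (M : Int) (S : String) (P : List Int) (out : String) : Decidable (Spec_lexicographically_largest_string N K M S P out) := by unfold Spec_lexicographically_largest_string; infer_instance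

-- ===== CLAIM (what is proved, stated in full; the proofs are below) =====
def Claim_equal_lexicographically_largest_string : Prop := ∀ (N : Int) (K : Int) (M : Int) (S : String) (P : List Int), Dom_lexicographically_largest_string N K M S P → Pre_lexicographically_largest_string N K M S P → Spec_lexicographically_largest_string N K M S P (lexicographically_largest_string N K M S P)

-- ===== LEMMAS AND PROOFS =====

theorem pvDvdCast (e n : Int) (h0 : 0 ≤ e) (h1 : 0 ≤ n) : e ∣ n ↔ e.toNat ∣ n.toNat := by
  rw [← Int.natCast_dvd_natCast, Int.toNat_of_nonneg h0, Int.toNat_of_nonneg h1]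

theorem pvIsPrime_iff (n : Int) : pvIsPrime n = true ↔ n.toNat.Prime := by
  unfold pvIsPrime
  by_cases h2 : n < 2
  · rw [if_pos h2]
    simp only [Bool.false_eq_true, false_iff]
    intro hp
    have := hp.two_le
    omega
  · push_neg at h2
    rw [if_neg (by omega), Nat.prime_def_le_sqrt]
    simp only [Bool.not_eq_true', List.any_eq_false, beq_eq_false_iff_ne, ne_eq]
    constructor
    · intro hA
      refine ⟨by omega, fun m hm hms hdvd => ?_⟩
      have hmem : (m : Int) ∈ PySem.List.pyRange 2 (pvSqrtInt n + 1) 1 := by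
        rw [PySem.List.mem_pyRange_one]
        unfold pvSqrtInt
        have : (m : Int) ≤ (Nat.sqrt n.toNat : Int) := by exact_mod_cast hms
        constructor
        · exact_mod_cast hm
        · omega
      apply hA _ hmem
      rw [beq_iff_eq, PySem.Int.mod_eq_zero_iff_dvd]
      exact (pvDvdCast _ _ (by omega) (by omega)).mpr (by simpa using hdvd)
    · rintro ⟨-, hB⟩ i hi
      rw [PySem.List.mem_pyRange_one] at hi
      unfold pvSqrtInt at hi
      intro hmod
      rw [beq_iff_eq, PySem.Int.mod_eq_zero_iff_dvd] at hmod
      have hdvd : i.toNat ∣ n.toNat := (pvDvdCast _ _ (by omega) (by omega)).mp hmod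
      exact hB i.toNat (by omega) (by omega) hdvd

-- n.toNat.Prime characterised over Int by trial divisors d with d*d ≤ n
theorem pvPrimeChar (n : Int) :
    (2 ≤ n ∧ ∀ d : Int, 2 ≤ d → d * d ≤ n → ¬ d ∣ n) ↔ n.toNat.Prime := by
  rw [Nat.prime_def_le_sqrt]
  constructor
  · rintro ⟨h2, h⟩
    refine ⟨by omega, fun m hm hms hdvd => ?_⟩
    have hmm : m * m ≤ n.toNat := Nat.le_sqrt.mp hms
    refine h m (by exact_mod_cast hm) ?_ ?_
    · have hc : ((m * m : Nat) : Int) ≤ ((n.toNat : Nat) : Int) := by exact_mod_cast hmm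
      push_cast at hc
      rwa [Int.toNat_of_nonneg (by omega : (0:Int) ≤ n)] at hc
    · exact (pvDvdCast _ _ (by omega) (by omega)).mpr (by simpa using hdvd)
  · rintro ⟨h2, hB⟩
    have h2' : 2 ≤ n := by omega
    refine ⟨h2', fun d hd hdd hdvd => ?_⟩
    have hee' : d.toNat * d.toNat ≤ n.toNat := by
      have hc : ((d.toNat * d.toNat : Nat) : Int) ≤ ((n.toNat : Nat) : Int) := by
        push_cast
        rw [Int.toNat_of_nonneg (by omega : (0:Int) ≤ d), Int.toNat_of_nonneg (by omega : (0:Int) ≤ n)]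
        exact hdd
      exact_mod_cast hc
    exact hB d.toNat (by omega) (Nat.le_sqrt.mpr hee') ((pvDvdCast _ _ (by omega) (by omega)).mp hdvd)

-- generic: a foldl of pySetD-to-false over a list of nonnegative indices
theorem pvFoldSetFalse (L : List Int) (hL : ∀ x ∈ L, 0 ≤ x) : ∀ (s : List Bool),
    ((L.foldl (fun acc x => PySem.List.pySetD acc x false) s).length = s.length) ∧
    (∀ j : Nat, (L.foldl (fun acc x => PySem.List.pySetD acc x false) s).getD j false
      = if (j : Int) ∈ L then false else s.getD j false) := by
  induction L with
  | nil => intro s; simp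
  | cons x L ih =>
    intro s
    have hx : 0 ≤ x := hL x (by simp)
    have ih' := ih (fun y hy => hL y (by simp [hy])) (PySem.List.pySetD s x false)
    simp only [List.foldl_cons]
    refine ⟨by rw [ih'.1, PySem.List.length_pySetD], fun j => ?_⟩
    rw [ih'.2 j, PySem.List.pySetD_of_nonneg _ _ hx]
    by_cases hmem : (j : Int) ∈ L
    · rw [if_pos hmem, if_pos (by simp [hmem])]
    · rw [if_neg hmem]
      by_cases hjx : (j : Int) = x
      · have hjx' : x.toNat = j := by omega
        rw [if_pos (by simp [hjx])]
        simp [List.getD_eq_getElem?_getD, List.getElem?_set, hjx']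
        split <;> simp
      · have hjx' : x.toNat ≠ j := by omega
        rw [if_neg (by simp [hjx, hmem])]
        simp [List.getD_eq_getElem?_getD, List.getElem?_set, hjx']

theorem pvMark_getD (s : List Bool) (i n : Int) (hi : 2 ≤ i) :
    (pvSieveMark s i n).length = s.length ∧
    (∀ j : Nat, (pvSieveMark s i n).getD j false
      = if i ∣ (j : Int) ∧ i * i ≤ (j : Int) ∧ (j : Int) ≤ n then false else s.getD j false) := by
  have hmem : ∀ x : Int, x ∈ PySem.List.pyRange (i * i) (n + 1) i ↔
      (i ∣ x ∧ i * i ≤ x ∧ x ≤ n) := by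
    intro x
    rw [PySem.List.mem_pyRange_iff_of_pos (by omega)]
    constructor
    · rintro ⟨h1, h2, h3⟩
      refine ⟨?_, h1, by omega⟩
      have : i ∣ (x - i * i) + i * i := (dvd_add h3 (Dvd.intro i rfl))
      simpa using this
    · rintro ⟨h1, h2, h3⟩
      exact ⟨h2, by omega, dvd_sub h1 (Dvd.intro i rfl)⟩
  have hpos : ∀ x ∈ PySem.List.pyRange (i * i) (n + 1) i, 0 ≤ x := by
    intro x hx
    have := (hmem x).mp hx
    nlinarith [this.2.1]
  have h := pvFoldSetFalse _ hpos s
  unfold pvSieveMark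
  exact ⟨h.1, fun j => by rw [h.2 j, if_congr (hmem (j : Int)) rfl rfl]⟩

def pvSieveInv (n : Int) (i : Int) (s : List Bool) : Prop :=
  s.length = n.toNat + 1 ∧ ∀ j : Nat, (j : Int) ≤ n →
    (s.getD j false = true ↔ 2 ≤ (j : Int) ∧
      ∀ d : Int, 2 ≤ d → d < i → d * d ≤ (j : Int) → ¬ d ∣ (j : Int))

theorem pvInvExit (n i : Int) (s : List Bool) (hi : 2 ≤ i) (hgt : n < i * i) (hInv : pvSieveInv n i s) :
    (s.length = n.toNat + 1 ∧
     ∀ j : Nat, (j : Int) ≤ n →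
       (s.getD j false = true ↔ 2 ≤ (j : Int) ∧
         ∀ d : Int, 2 ≤ d → d * d ≤ (j : Int) → ¬ d ∣ (j : Int))) := by
  refine ⟨hInv.1, fun j hj => ?_⟩
  rw [hInv.2 j hj]
  constructor
  · rintro ⟨h2, h⟩
    refine ⟨h2, fun d hd hdd => h d hd ?_ hdd⟩
    by_contra hcon
    push_neg at hcon
    have hsq : i * i ≤ d * d := mul_le_mul hcon hcon (by omega) (by omega)
    linarith
  · rintro ⟨h2, h⟩
    exact ⟨h2, fun d hd _ hdd => h d hd hdd⟩

theorem pvSieveStep (n i : Int) (s : List Bool) (hn : 2 ≤ n) (hi : 2 ≤ i) (hii : i * i ≤ n)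
    (hInv : pvSieveInv n i s) :
    pvSieveInv n (i + 1) (if PySem.List.pyGetD s i false then pvSieveMark s i n else s) := by
  obtain ⟨hlen, hchar⟩ := hInv
  have hin : i ≤ n := by nlinarith
  have hilen : i < (s.length : Int) := by rw [hlen]; push_cast; omega
  have hgeti : PySem.List.pyGetD s i false = s.getD i.toNat false := by
    rw [PySem.List.pyGetD_eq_getElem s false (by omega) hilen,
      List.getD_eq_getElem s false (by omega)]
  by_cases hs : s.getD i.toNat false = true
  · rw [if_pos (by rw [hgeti]; exact hs)]
    have hm := pvMark_getD s i n hi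
    refine ⟨by rw [hm.1, hlen], fun j hj => ?_⟩
    rw [hm.2 j]
    by_cases hc : i ∣ (j : Int) ∧ i * i ≤ (j : Int)
    · rw [if_pos ⟨hc.1, hc.2, hj⟩]
      simp only [Bool.false_eq_true, false_iff]
      rintro ⟨h2, h⟩
      exact h i hi (by omega) hc.2 hc.1
    · rw [if_neg (by tauto), hchar j hj]
      constructor
      · rintro ⟨h2, h⟩
        refine ⟨h2, fun d hd hdi hdd hddvd => ?_⟩
        rcases (by omega : d < i ∨ d = i) with hlt | rfl
        · exact h d hd hlt hdd hddvd
        · exact hc ⟨hddvd, hdd⟩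
      · rintro ⟨h2, h⟩
        exact ⟨h2, fun d hd hdi hdd => h d hd (by omega) hdd⟩
  · rw [if_neg (by rw [hgeti]; exact hs)]
    refine ⟨hlen, fun j hj => ?_⟩
    rw [hchar j hj]
    constructor
    · rintro ⟨h2, h⟩
      refine ⟨h2, fun d hd hdi hdd hddvd => ?_⟩
      rcases (by omega : d < i ∨ d = i) with hlt | heq
      · exact h d hd hlt hdd hddvd
      · -- s[i] is false, so i has a small divisor d' which also divides j
        rw [heq] at hdd hddvd
        have hji : ((i.toNat : Nat) : Int) = i := by omega
        have hchari := hchar i.toNat (by omega)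
        rw [hji] at hchari
        have : ¬ (2 ≤ i ∧ ∀ d' : Int, 2 ≤ d' → d' < i → d' * d' ≤ i → ¬ d' ∣ i) := by
          intro hcon
          exact hs (hchari.mpr hcon)
        push_neg at this
        obtain ⟨d', hd'2, hd'i, hd'd, hd'dvd⟩ := this hi
        have hjd' : d' ∣ (j : Int) := dvd_trans hd'dvd hddvd
        have hd'j : d' * d' ≤ (j : Int) := by nlinarith
        exact h d' hd'2 hd'i hd'j hjd'
    · rintro ⟨h2, h⟩
      exact ⟨h2, fun d hd hdi hdd => h d hd (by omega) hdd⟩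

theorem pvSieveLoop_spec (n : Int) (hn : 2 ≤ n) : ∀ (fuel : Nat) (i : Int) (s : List Bool),
    (n + 1 - i).toNat ≤ fuel → 2 ≤ i → pvSieveInv n i s →
    ((pvSieveLoop fuel s i n).length = n.toNat + 1 ∧
     ∀ j : Nat, (j : Int) ≤ n →
       ((pvSieveLoop fuel s i n).getD j false = true ↔ 2 ≤ (j : Int) ∧
         ∀ d : Int, 2 ≤ d → d * d ≤ (j : Int) → ¬ d ∣ (j : Int))) := by
  intro fuel
  induction fuel with
  | zero =>
    intro i s hf hi hInv
    have : n + 1 ≤ i := by omega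
    exact pvInvExit n i s hi (by nlinarith) hInv
  | succ m ih =>
    intro i s hf hi hInv
    rw [pvSieveLoop]
    by_cases hii : i * i ≤ n
    · rw [if_pos hii]
      have hin : i ≤ n := by nlinarith
      exact ih (i + 1) _ (by omega) (by omega) (pvSieveStep n i s hn hi hii hInv)
    · rw [if_neg hii]
      exact pvInvExit n i s hi (by omega) hInv

theorem pvSieve0_inv (n : Int) (hn : 2 ≤ n) :
    pvSieveInv n 2 (PySem.List.pySetD (PySem.List.pySetD (List.replicate (n.toNat + 1) true) 0 false) 1 false) := by
  constructor
  · rw [PySem.List.length_pySetD, PySem.List.length_pySetD, List.length_replicate]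
  · intro j hj
    have h0 : PySem.List.pySetD (List.replicate (n.toNat + 1) true) 0 false
        = (List.replicate (n.toNat + 1) true).set 0 false :=
      PySem.List.pySetD_of_nonneg _ _ (by omega)
    have h1 : PySem.List.pySetD ((List.replicate (n.toNat + 1) true).set 0 false) 1 false
        = ((List.replicate (n.toNat + 1) true).set 0 false).set 1 false :=
      PySem.List.pySetD_of_nonneg _ _ (by omega)
    rw [h0, h1]
    have hjlen : j < n.toNat + 1 := by omega
    constructor
    · intro hget
      refine ⟨?_, fun d h2d hd2 _ _ => by omega⟩
      by_contra hlt
      have : j = 0 ∨ j = 1 := by omega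
      rcases this with rfl | rfl <;>
        simp [List.getD_eq_getElem?_getD, List.getElem?_set, List.getElem?_replicate, hjlen] at hget
    · rintro ⟨h2, -⟩
      have hj0 : j ≠ 0 := by omega
      have hj1 : j ≠ 1 := by omega
      have hne0 : (0 : Nat) ≠ j := by omega
      have hne1 : (1 : Nat) ≠ j := by omega
      simp [List.getD_eq_getElem?_getD, List.getElem?_set, List.getElem?_replicate, hjlen, hne0, hne1]

theorem pvSieve_isPrime (n : Int) (hn : 2 ≤ n) (p : Int) (h2 : 2 ≤ p) (hp : p ≤ n) :
    PySem.List.pyGetD (pvSieveLoop (n.toNat + 1)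
      (PySem.List.pySetD (PySem.List.pySetD (List.replicate (n.toNat + 1) true) 0 false) 1 false) 2 n) p false
    = pvIsPrime p := by
  obtain ⟨hlen, hchar⟩ := pvSieveLoop_spec n hn (n.toNat + 1) 2 _ (by omega) (by omega) (pvSieve0_inv n hn)
  have hchar' := hchar p.toNat (by omega)
  rw [(by omega : ((p.toNat : Nat) : Int) = p)] at hchar'
  set L := pvSieveLoop (n.toNat + 1)
    (PySem.List.pySetD (PySem.List.pySetD (List.replicate (n.toNat + 1) true) 0 false) 1 false) 2 n with hL
  have hplen : p < (L.length : Int) := by rw [hlen]; push_cast; omega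
  rw [PySem.List.pyGetD_eq_getElem L false (by omega) hplen,
    ← List.getD_eq_getElem L false (by rw [hlen]; omega)]
  rw [Bool.eq_iff_iff, hchar', pvIsPrime_iff, ← pvPrimeChar p]

theorem pvCharOfNat_toNat (k : Nat) (h : k < 55296) : (Char.ofNat k).toNat = k := by
  rw [Char.toNat_ofNat]
  simp [Nat.isValidChar]
  omega

theorem pvCharLe_iff (a b : Char) : a ≤ b ↔ a.toNat ≤ b.toNat := by
  rw [Char.le_def, UInt32.le_iff_toNat_le]
  exact Iff.rfl

theorem pvCharEq_of_toNat (x : Char) (k : Nat) (h : x.toNat = k) :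
    x = Char.ofNat k := by
  rw [← h, Char.ofNat_toNat]

theorem pvCountAux (sel : List Char) (codes : List Nat) (hv : ∀ k ∈ codes, k < 55296)
    (hnd : codes.Nodup) (x : Char) :
    (codes.flatMap (fun k => List.replicate (sel.count (Char.ofNat k)) (Char.ofNat k))).count x
      = if x.toNat ∈ codes then sel.count x else 0 := by
  induction codes with
  | nil => simp
  | cons k ks ih =>
    have hk : k < 55296 := hv k (by simp)
    rw [List.flatMap_cons, List.count_append,
      ih (fun j hj => hv j (by simp [hj])) hnd.of_cons]
    by_cases hx : x = Char.ofNat k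
    · have hxk : x.toNat = k := by rw [hx, pvCharOfNat_toNat k hk]
      have hnk : x.toNat ∉ ks := by rw [hxk]; exact (List.nodup_cons.mp hnd).1
      rw [if_neg hnk, if_pos (by rw [hxk]; exact List.mem_cons_self), ← hx]
      simp [List.count_replicate]
    · have hxk : x.toNat ≠ k := fun h => hx (pvCharEq_of_toNat x k h)
      have hbeq : (Char.ofNat k == x) = false := beq_eq_false_iff_ne.mpr (fun h => hx h.symm)
      have hrep : (List.replicate (sel.count (Char.ofNat k)) (Char.ofNat k)).count x = 0 := by
        rw [List.count_replicate, hbeq]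
        simp
      rw [hrep]
      have hiff : (x.toNat ∈ k :: ks) ↔ (x.toNat ∈ ks) := by
        rw [List.mem_cons]
        simp [hxk]
      rw [if_congr hiff rfl rfl]
      omega

theorem pvPairwiseAux (sel : List Char) (codes : List Nat) (hv : ∀ k ∈ codes, k < 55296)
    (hs : codes.Pairwise (fun a b => b < a)) :
    (codes.flatMap (fun k => List.replicate (sel.count (Char.ofNat k)) (Char.ofNat k))).Pairwise
      (fun a b : Char => b ≤ a) := by
  induction codes with
  | nil => simp
  | cons k ks ih =>
    have hk : k < 55296 := hv k (by simp)
    rw [List.flatMap_cons]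
    refine List.pairwise_append.mpr ⟨?_, ih (fun j hj => hv j (by simp [hj])) hs.of_cons, ?_⟩
    · exact List.pairwise_replicate.mpr (Or.inr le_rfl)
    · intro a ha b hb
      have ha' : a = Char.ofNat k := List.eq_of_mem_replicate ha
      rcases List.mem_flatMap.mp hb with ⟨j, hj, hbj⟩
      have hb' : b = Char.ofNat j := List.eq_of_mem_replicate hbj
      have hjk : j < k := (List.pairwise_cons.mp hs).1 j hj
      have hjval : j < 55296 := hv j (by simp [hj])
      rw [ha', hb', pvCharLe_iff, pvCharOfNat_toNat k hk, pvCharOfNat_toNat j hjval]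
      omega

theorem pvDescEq (sel : List Char) (h : ∀ c ∈ sel, c.toNat ≤ 127) :
    ((List.range 128).map (fun k => 127 - k)).flatMap
        (fun k => List.replicate (sel.count (Char.ofNat k)) (Char.ofNat k))
      = PySem.List.sorted sel (fun x => x) true := by
  have hv : ∀ k ∈ (List.range 128).map (fun k => 127 - k), k < 55296 := by
    intro k hk
    rcases List.mem_map.mp hk with ⟨j, hj, rfl⟩
    omega
  have hnd : ((List.range 128).map (fun k => 127 - k)).Nodup := by
    refine List.Nodup.map_on ?_ List.nodup_range
    intro a ha b hb hab
    rw [List.mem_range] at ha hb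
    omega
  have hsorted : ((List.range 128).map (fun k => 127 - k)).Pairwise (fun a b => b < a) := by
    refine List.pairwise_map.mpr ?_
    refine List.pairwise_lt_range.imp_of_mem ?_
    intro a b ha hb hab
    rw [List.mem_range] at ha hb
    omega
  have hperm : (((List.range 128).map (fun k => 127 - k)).flatMap
      (fun k => List.replicate (sel.count (Char.ofNat k)) (Char.ofNat k))).Perm sel := by
    rw [List.perm_iff_count]
    intro x
    rw [pvCountAux sel _ hv hnd x]
    by_cases hx : x.toNat ∈ (List.range 128).map (fun k => 127 - k)
    · rw [if_pos hx]
    · rw [if_neg hx]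
      by_contra hc
      have hxs : x ∈ sel := by
        rw [← List.count_pos_iff, Nat.pos_iff_ne_zero]
        exact fun h' => hc h'.symm
      exact hx (List.mem_map.mpr ⟨127 - x.toNat, List.mem_range.mpr (by have := h x hxs; omega),
        by have := h x hxs; omega⟩)
  refine (hperm.trans (PySem.List.sorted_perm sel (fun x => x) true).symm).eq_of_pairwise
    (fun a b _ _ h1 h2 => le_antisymm h2 h1)
    (pvPairwiseAux sel _ hv hsorted)
    (PySem.List.sorted_pairwise_rev sel (fun x => x))

-- count of an Int value in the flatMap of replicate blocks over pairs with nodup firsts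
theorem pvFlatCount (es : List (Int × Char)) (m : Int → Nat)
    (hnd : (es.map (fun q => q.1)).Nodup) (v : Int) :
    (es.flatMap (fun q => List.replicate (m q.1) q.1)).count v
      = if v ∈ es.map (fun q => q.1) then m v else 0 := by
  induction es with
  | nil => simp
  | cons q es ih =>
    rw [List.flatMap_cons, List.count_append, List.map_cons] at *
    rw [ih hnd.of_cons]
    by_cases hv : v = q.1
    · have hnmem : v ∉ es.map (fun q => q.1) := by
        rw [hv]; exact (List.nodup_cons.mp hnd).1
      rw [if_neg hnmem, if_pos (by simp [hv]), hv]
      simp [List.count_replicate]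
    · have hrep : (List.replicate (m q.1) q.1).count v = 0 := by
        rw [List.count_replicate, beq_eq_false_iff_ne.mpr (fun h => hv h.symm)]
        simp
      rw [hrep]
      have hiff : (v ∈ q.1 :: es.map (fun q => q.1)) ↔ (v ∈ es.map (fun q => q.1)) := by
        simp [hv]
      rw [if_congr hiff rfl rfl]
      omega

theorem pvFlatPairwise (es : List (Int × Char)) (m : Int → Nat)
    (hp : es.Pairwise (fun a b => a.1 < b.1)) :
    (es.flatMap (fun q => List.replicate (m q.1) q.1)).Pairwise (fun a b : Int => a ≤ b) := by
  induction es with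
  | nil => simp
  | cons q es ih =>
    rw [List.flatMap_cons]
    refine List.pairwise_append.mpr ⟨?_, ih hp.of_cons, ?_⟩
    · exact List.pairwise_replicate.mpr (Or.inr le_rfl)
    · intro a ha b hb
      have ha' : a = q.1 := List.eq_of_mem_replicate ha
      rcases List.mem_flatMap.mp hb with ⟨r, hr, hbr⟩
      have hb' : b = r.1 := List.eq_of_mem_replicate hbr
      have := (List.pairwise_cons.mp hp).1 r hr
      omega

theorem pvFlatMapCongr {α β : Type} (es : List α) (f g : α → List β)
    (h : ∀ q ∈ es, f q = g q) : es.flatMap f = es.flatMap g := by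
  induction es with
  | nil => rfl
  | cons q es ih =>
    rw [List.flatMap_cons, List.flatMap_cons, h q (by simp), ih (fun r hr => h r (by simp [hr]))]

-- the scan over enumerate(S): first component and bucket characterisation
theorem pvScan_spec (cnt : PySem.Dict Int Int) (hc : ∀ v : Int, 0 ≤ cnt.getD v 0) :
    ∀ (es : List (Int × Char)) (l : List Int) (b : List Int),
    (∀ q ∈ es, q.2.toNat < 128) → b.length = 128 →
    ((es.foldl (pvScanStep cnt) (l, b)).1
        = l ++ es.flatMap (fun q => List.replicate (cnt.getD (q.1 + 1) 0).toNat q.1)) ∧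
    ((es.foldl (pvScanStep cnt) (l, b)).2.length = 128) ∧
    (∀ code : Nat, code < 128 →
      (es.foldl (pvScanStep cnt) (l, b)).2.getD code 0
        = b.getD code 0 +
          ((es.flatMap (fun q => List.replicate (cnt.getD (q.1 + 1) 0).toNat q.2)).count
            (Char.ofNat code) : Int)) := by
  intro es
  induction es with
  | nil => intro l b hq hb; simp [hb]
  | cons q es ih =>
    intro l b hq hb
    have hq2 : q.2.toNat < 128 := hq q (by simp)
    simp only [List.foldl_cons, List.flatMap_cons]
    by_cases hc0 : cnt.getD (q.1 + 1) 0 = 0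
    · have hstep : pvScanStep cnt (l, b) q = (l, b) := by
        simp [pvScanStep, hc0]
      rw [hstep]
      obtain ⟨i1, i2, i3⟩ := ih l b (fun r hr => hq r (by simp [hr])) hb
      refine ⟨by rw [i1]; simp [hc0], i2, fun code hcode => ?_⟩
      rw [i3 code hcode]
      simp [hc0]
    · have hcpos : 0 < cnt.getD (q.1 + 1) 0 := lt_of_le_of_ne (hc _) (Ne.symm hc0)
      have hb' : (PySem.List.pySetD b (q.2.toNat : Int)
          (PySem.List.pyGetD b (q.2.toNat : Int) 0 + cnt.getD (q.1 + 1) 0))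
          = b.set q.2.toNat (b.getD q.2.toNat 0 + cnt.getD (q.1 + 1) 0) := by
        rw [PySem.List.pyGetD_natCast, PySem.List.pySetD_natCast]
      have hstep : pvScanStep cnt (l, b) q
          = (l ++ List.replicate (cnt.getD (q.1 + 1) 0).toNat q.1,
             b.set q.2.toNat (b.getD q.2.toNat 0 + cnt.getD (q.1 + 1) 0)) := by
        simp only [pvScanStep]
        rw [if_pos hc0, hb']
      rw [hstep]
      have hbl : (b.set q.2.toNat (b.getD q.2.toNat 0 + cnt.getD (q.1 + 1) 0)).length = 128 := by
        rw [List.length_set, hb]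
      obtain ⟨i1, i2, i3⟩ := ih (l ++ List.replicate (cnt.getD (q.1 + 1) 0).toNat q.1)
        (b.set q.2.toNat (b.getD q.2.toNat 0 + cnt.getD (q.1 + 1) 0))
        (fun r hr => hq r (by simp [hr])) hbl
      refine ⟨by rw [i1, List.append_assoc], i2, fun code hcode => ?_⟩
      rw [i3 code hcode, List.count_append]
      have hsetD : (b.set q.2.toNat (b.getD q.2.toNat 0 + cnt.getD (q.1 + 1) 0)).getD code 0
          = if q.2.toNat = code then b.getD code 0 + cnt.getD (q.1 + 1) 0 else b.getD code 0 := by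
        rw [List.getD_eq_getElem _ 0 (by omega : code < (b.set q.2.toNat _).length),
          List.getElem_set]
        by_cases heq : q.2.toNat = code
        · rw [if_pos heq, if_pos heq, heq]
        · rw [if_neg heq, if_neg heq]
          exact (List.getD_eq_getElem b 0 (by omega)).symm
      rw [hsetD]
      by_cases heq : q.2.toNat = code
      · have hqc : Char.ofNat code = q.2 := by rw [← heq, Char.ofNat_toNat]
        have hcount : (List.replicate (cnt.getD (q.1 + 1) 0).toNat q.2).count (Char.ofNat code)
            = (cnt.getD (q.1 + 1) 0).toNat := by
          rw [hqc]
          simp [List.count_replicate]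
        rw [if_pos heq, hcount]
        push_cast [Int.toNat_of_nonneg (hc (q.1 + 1))]
        ring
      · have hqc : Char.ofNat code ≠ q.2 := by
          intro h
          exact heq (by rw [← h, pvCharOfNat_toNat code (by omega)])
        have hcount : (List.replicate (cnt.getD (q.1 + 1) 0).toNat q.2).count (Char.ofNat code) = 0 := by
          simp [List.count_replicate]
          exact fun h => (hqc h.symm).elim
        rw [if_neg heq, hcount]
        push_cast
        ring

-- positional range-fold over idxs/desc equals the fold over zip of the take-prefixes
theorem pvRangeFoldZip (idxs : List Int) (desc : List Char) (cs : List Char) (t : Int)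
    (h0 : 0 ≤ t) (h1 : t.toNat ≤ idxs.length) (h2 : t.toNat ≤ desc.length) :
    (PySem.List.pyRange 0 t 1).foldl
        (fun acc i => PySem.List.pySetD acc (PySem.List.pyGetD idxs i 0)
          (PySem.List.pyGetD desc i ' ')) cs
      = ((idxs.take t.toNat).zip (desc.take t.toNat)).foldl
          (fun acc q => PySem.List.pySetD acc q.1 q.2) cs := by
  have hzip : (idxs.take t.toNat).zip (desc.take t.toNat)
      = (List.range t.toNat).map (fun k => (idxs.getD k 0, desc.getD k ' ')) := by
    apply List.ext_getElem
    · simp [List.length_zip, List.length_take]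
      omega
    · intro k hk1 hk2
      have hkt : k < t.toNat := by simpa using hk2
      rw [List.getElem_zip, List.getElem_take, List.getElem_take, List.getElem_map,
        List.getElem_range, List.getD_eq_getElem idxs 0 (by omega),
        List.getD_eq_getElem desc ' ' (by omega)]
  rw [hzip, List.foldl_map, PySem.List.pyRange_zero, List.foldl_map]
  simp only [PySem.List.pyGetD_natCast]

theorem pvStep (cs : List Char) (d : PySem.Dict Int Char) (k : Int) (v : Char)
    (h0 : 0 ≤ k) (h1 : k < (cs.length : Int)) :
    PySem.List.pySetD ((PySem.List.enumerate cs 0).map (fun p => d.getD p.1 p.2)) k v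
      = (PySem.List.enumerate cs 0).map (fun p => (d.insert k v).getD p.1 p.2) := by
  rw [PySem.List.pySetD_of_nonneg _ _ h0]
  apply List.ext_getElem
  · simp [PySem.List.length_enumerate]
  · intro j hj1 hj2
    have hjcs : j < cs.length := by simpa [PySem.List.length_enumerate] using hj2
    have hje : j < (PySem.List.enumerate cs 0).length := by
      simpa [PySem.List.length_enumerate] using hjcs
    rw [List.getElem_set, List.getElem_map, List.getElem_map, PySem.List.getElem_enumerate]
    simp only [PySem.Dict.getD_insert]
    by_cases hjk : (j : Int) = k
    · rw [if_pos (by omega), if_pos (by omega)]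
    · rw [if_neg (by omega), if_neg (by omega)]

theorem pvSetFoldEq (ps : List (Int × Char)) : ∀ (cs : List Char) (d : PySem.Dict Int Char),
    (∀ q ∈ ps, 0 ≤ q.1 ∧ q.1 < (cs.length : Int)) →
    ps.foldl (fun acc q => PySem.List.pySetD acc q.1 q.2)
        ((PySem.List.enumerate cs 0).map (fun p => d.getD p.1 p.2))
      = (PySem.List.enumerate cs 0).map
          (fun p => (ps.foldl (fun d q => d.insert q.1 q.2) d).getD p.1 p.2) := by
  induction ps with
  | nil => intro cs d h; rfl
  | cons q ps ih =>
    intro cs d h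
    simp only [List.foldl_cons]
    rw [pvStep cs d q.1 q.2 (h q (by simp)).1 (h q (by simp)).2]
    exact ih cs (d.insert q.1 q.2) (fun r hr => h r (by simp [hr]))


theorem pvIsPrime_two_le (p : Int) (h : pvIsPrime p = true) : 2 ≤ p := by
  by_contra hlt
  rw [pvIsPrime, if_pos (by omega)] at h
  exact Bool.false_ne_true h

theorem pvCnt_eq (n : Int) (sieve : List Bool) (P : List Int)
    (hs : ∀ p ∈ P, 2 ≤ p → p ≤ n → PySem.List.pyGetD sieve p false = pvIsPrime p)
    (hall : ∀ p ∈ P, p.toNat.Prime → p ≤ n) :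
    P.foldl (fun d p =>
        if 2 ≤ p ∧ p ≤ n ∧ PySem.List.pyGetD sieve p false then d.insert p (d.getD p 0 + 1) else d)
      (PySem.Dict.empty : PySem.Dict Int Int)
    = PySem.Dict.counter (P.filter pvIsPrime) := by
  refine (PySem.List.foldl_ite_eq_foldl_filter
      (fun p => 2 ≤ p ∧ p ≤ n ∧ PySem.List.pyGetD sieve p false = true)
      (fun (d : PySem.Dict Int Int) p => d.insert p (d.getD p 0 + 1)) P PySem.Dict.empty).trans ?_
  rw [List.filter_congr (fun p hp => ?_), PySem.Dict.foldl_insert_getD_add_one_eq_counter]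
  rw [Bool.eq_iff_iff, decide_eq_true_iff]
  constructor
  · rintro ⟨h2, hn, hg⟩
    rw [← hs p hp h2 hn]
    exact hg
  · intro hprime
    have h2 : 2 ≤ p := pvIsPrime_two_le p hprime
    have hn : p ≤ n := hall p hp ((pvIsPrime_iff p).mp hprime)
    exact ⟨h2, hn, by rw [hs p hp h2 hn]; exact hprime⟩

theorem pvDescFold (bucket : List Int) (sel : List Char)
    (hb : ∀ code : Nat, code < 128 → bucket.getD code 0 = (sel.count (Char.ofNat code) : Int))
    (hsel : ∀ c ∈ sel, c.toNat ≤ 127) :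
    (PySem.List.pyRange 127 (-1) (-1)).foldl
        (fun acc code => acc ++ List.replicate (PySem.List.pyGetD bucket code 0).toNat
          (Char.ofNat code.toNat)) []
      = PySem.List.sorted sel (fun x => x) true := by
  rw [PySem.List.foldl_append_eq_flatMap, List.nil_append]
  have hrange : PySem.List.pyRange 127 (-1) (-1)
      = ((List.range 128).map (fun k => 127 - k)).map (fun k : Nat => (k : Int)) := by
    rw [PySem.List.pyRange_neg_one]
    apply List.ext_getElem
    · simp
    · intro j h1 h2
      simp only [List.getElem_map, List.getElem_range]
      have hj : j < 128 := by simpa using h1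
      omega
  rw [hrange, List.flatMap_map]
  rw [pvFlatMapCongr _ _ (fun k => List.replicate (sel.count (Char.ofNat k)) (Char.ofNat k))
    (fun k hk => ?_)]
  · exact pvDescEq sel hsel
  · have hk128 : k < 128 := by
      rcases List.mem_map.mp hk with ⟨j, hj, rfl⟩
      omega
    rw [PySem.List.pyGetD_natCast, hb k hk128, Int.toNat_natCast, Int.toNat_natCast]


theorem pvSetFoldEq2 (ps : List (Int × Char)) (cs : List Char)
    (h : ∀ q ∈ ps, 0 ≤ q.1 ∧ q.1 < (cs.length : Int)) :
    ps.foldl (fun acc q => PySem.List.pySetD acc q.1 q.2) cs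
      = (PySem.List.enumerate cs 0).map
          (fun p => (ps.foldl (fun d q => d.insert q.1 q.2)
            (PySem.Dict.empty : PySem.Dict Int Char)).getD p.1 p.2) := by
  have hcs0 : (PySem.List.enumerate cs 0).map
      (fun p => (PySem.Dict.empty : PySem.Dict Int Char).getD p.1 p.2) = cs := by
    simp [PySem.Dict.getD_empty, PySem.List.map_snd_enumerate]
  have h1 := pvSetFoldEq ps cs PySem.Dict.empty h
  rw [hcs0] at h1
  exact h1

theorem pvMain (N K M : Int) (cs : List Char) (P : List Int)
    (hDomS : ∀ c ∈ cs, c.toNat ≤ 127) (hM : 0 < M) (hge2 : 2 ≤ (cs.length : Int))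
    (hall : ∀ p ∈ P, p.toNat.Prime → p ≤ (cs.length : Int)) :
    lexicographically_largest_string N K M (String.ofList cs) P
      = lexicographically_largest_string_alt N K M (String.ofList cs) P := by
  have hnot : ¬ (M ≤ 0 ∨ (cs.length : Int) < 2) := by push_neg; exact ⟨hM, by omega⟩
  simp only [lexicographically_largest_string, lexicographically_largest_string_alt,
    String.toList_ofList]
  rw [if_neg hnot]
  set Pf := P.filter pvIsPrime with hPfd
  set flat := (PySem.List.enumerate cs 0).flatMap
    (fun q => List.replicate (Pf.count (q.1 + 1)) q.1) with hflatd
  set selA := flat.map (fun i => PySem.List.pyGetD cs i ' ') with hselAd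
  -- the sieve lookups agree with pvIsPrime on 2..n
  have hs : ∀ p ∈ P, 2 ≤ p → p ≤ (cs.length : Int) →
      PySem.List.pyGetD (pvSieveLoop ((cs.length : Int).toNat + 1)
        (PySem.List.pySetD (PySem.List.pySetD
          (List.replicate ((cs.length : Int).toNat + 1) true) 0 false) 1 false) 2
        (cs.length : Int)) p false = pvIsPrime p :=
    fun p _ h2 hp => pvSieve_isPrime (cs.length : Int) hge2 p h2 hp
  -- the counting dict is Counter(filter(isPrime, P))
  have hcnt := pvCnt_eq (cs.length : Int) _ P hs hall
  rw [hcnt]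
  have hc : ∀ v : Int, 0 ≤ (PySem.Dict.counter Pf).getD v 0 := by
    intro v
    rw [PySem.Dict.getD_counter]
    exact Int.natCast_nonneg _
  obtain ⟨hfst, hblen, hbchar⟩ := pvScan_spec (PySem.Dict.counter Pf) hc
    (PySem.List.enumerate cs 0) [] (List.replicate 128 0)
    (by
      intro q hq
      rcases (PySem.List.mem_enumerate_iff cs 0 q).mp hq with ⟨k, hk, rfl⟩
      have := hDomS cs[k] (List.getElem_mem hk)
      show cs[k].toNat < 128
      omega)
    (List.length_replicate)
  -- scan.1 = flat
  have hscan1 : ((PySem.List.enumerate cs 0).foldl (pvScanStep (PySem.Dict.counter Pf))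
      ([], List.replicate 128 0)).1 = flat := by
    rw [hfst, List.nil_append, hflatd]
    exact pvFlatMapCongr _ _ _ (fun q _ => by rw [PySem.Dict.getD_counter, Int.toNat_natCast])
  -- membership bound for elements of flat
  have hflatmem : ∀ x ∈ flat, 0 ≤ x ∧ x < (cs.length : Int) := by
    intro x hx
    rw [hflatd] at hx
    rcases List.mem_flatMap.mp hx with ⟨q, hq, hxq⟩
    rcases (PySem.List.mem_enumerate_iff cs 0 q).mp hq with ⟨k, hk, rfl⟩
    have := List.eq_of_mem_replicate hxq
    subst this
    constructor <;> simp <;> omega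
  -- A's sorted prime-index list is flat
  have hidx : PySem.List.sorted (Pf.map (fun p => p - 1)) (fun x => x) false = flat := by
    apply PySem.List.sorted_id_eq_of_perm_of_pairwise
    · rw [List.perm_iff_count]
      intro v
      have hnd : ((PySem.List.enumerate cs 0).map (fun q => q.1)).Nodup := by
        rw [PySem.List.map_fst_enumerate]
        exact PySem.List.nodup_pyRange_one 0 _
      have hcv := pvFlatCount (PySem.List.enumerate cs 0) (fun x => Pf.count (x + 1)) hnd v
      rw [hflatd]
      rw [hcv]
      have hinj : Function.Injective (fun p : Int => p - 1) := fun a b h => by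
        simpa using h
      have hmapc := List.count_map_of_injective Pf (fun p => p - 1) hinj (v + 1)
      simp only [add_sub_cancel_right] at hmapc
      rw [hmapc]
      have hmemv : v ∈ (PySem.List.enumerate cs 0).map (fun q => q.1) ↔
          (0 ≤ v ∧ v < (cs.length : Int)) := by
        rw [PySem.List.map_fst_enumerate, PySem.List.mem_pyRange_one]
        constructor
        · rintro ⟨h1, h2⟩; exact ⟨h1, by omega⟩
        · rintro ⟨h1, h2⟩; exact ⟨h1, by omega⟩
      by_cases hv : 0 ≤ v ∧ v < (cs.length : Int)
      · rw [if_pos (hmemv.mpr hv)]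
      · rw [if_neg (fun h => hv (hmemv.mp h))]
        symm
        rw [List.count_eq_zero]
        intro hmem
        rw [hPfd] at hmem
        rcases List.mem_filter.mp hmem with ⟨hP, hprime⟩
        have h2 := pvIsPrime_two_le (v + 1) hprime
        have hn := hall (v + 1) hP ((pvIsPrime_iff (v + 1)).mp hprime)
        exact hv ⟨by omega, by omega⟩
    · rw [hflatd]
      exact pvFlatPairwise _ (fun x => Pf.count (x + 1)) (PySem.List.pairwise_lt_enumerate cs 0)
  -- selA is the char blocks
  have hselC : selA = (PySem.List.enumerate cs 0).flatMap
      (fun q => List.replicate (Pf.count (q.1 + 1)) q.2) := by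
    rw [hselAd, hflatd, List.map_flatMap]
    refine pvFlatMapCongr _ _ _ (fun q hq => ?_)
    rcases (PySem.List.mem_enumerate_iff cs 0 q).mp hq with ⟨k, hk, rfl⟩
    rw [List.map_replicate]
    simp only [zero_add]
    rw [PySem.List.pyGetD_natCast, List.getD_eq_getElem cs ' ' hk]
  have hselchars : ∀ c ∈ selA, c.toNat ≤ 127 := by
    intro c hcm
    rw [hselC] at hcm
    rcases List.mem_flatMap.mp hcm with ⟨q, hq, hcq⟩
    rcases (PySem.List.mem_enumerate_iff cs 0 q).mp hq with ⟨k, hk, rfl⟩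
    have := List.eq_of_mem_replicate hcq
    subst this
    exact hDomS cs[k] (List.getElem_mem hk)
  -- B's bucket counts selA
  have hbuck : ∀ code : Nat, code < 128 →
      ((PySem.List.enumerate cs 0).foldl (pvScanStep (PySem.Dict.counter Pf))
        ([], List.replicate 128 0)).2.getD code 0 = (selA.count (Char.ofNat code) : Int) := by
    intro code hcode
    rw [hbchar code hcode]
    have hrep0 : (List.replicate 128 (0 : Int)).getD code 0 = 0 := by
      rw [List.getD_eq_getElem _ 0 (by simpa using hcode), List.getElem_replicate]
    rw [hrep0, zero_add, hselC]
    congr 1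
    refine congrArg _ (pvFlatMapCongr _ _ _ (fun q _ => by
      rw [PySem.Dict.getD_counter, Int.toNat_natCast]))
  -- B's desc list is sorted(selA, reverse=True)
  have hdesc : (PySem.List.pyRange 127 (-1) (-1)).foldl
      (fun acc code => acc ++ List.replicate (PySem.List.pyGetD
        ((PySem.List.enumerate cs 0).foldl (pvScanStep (PySem.Dict.counter Pf))
          ([], List.replicate 128 0)).2 code 0).toNat (Char.ofNat code.toNat)) []
      = PySem.List.sorted selA (fun x => x) true :=
    pvDescFold _ selA hbuck hselchars
  rw [hdesc, hscan1, hidx, hselAd]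
  -- the common truncation length
  have ht0 : 0 ≤ min M (flat.length : Int) := le_min (by omega) (Int.natCast_nonneg _)
  have ht1 : (min M (flat.length : Int)).toNat ≤ flat.length := by
    have := min_le_right M (flat.length : Int)
    omega
  have ht2 : (min M (flat.length : Int)).toNat ≤
      (PySem.List.sorted (flat.map (fun i => PySem.List.pyGetD cs i ' ')) (fun x => x) true).length := by
    rw [PySem.List.length_sorted, List.length_map]
    exact ht1
  rw [PySem.List.slice_to _ ht0, PySem.List.slice_to _ ht0]
  by_cases hfe : flat = []
  · rw [if_pos (Or.inl hfe), hfe]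
    simp [PySem.Dict.getD_empty, PySem.List.map_snd_enumerate]
  · rw [if_neg (not_or.mpr ⟨hfe, by omega⟩)]
    rw [pvRangeFoldZip flat _ cs (min M (flat.length : Int)) ht0 ht1 ht2]
    refine congrArg String.ofList (pvSetFoldEq2 _ cs ?_)
    rintro ⟨a, b⟩ hab
    have hmem := (List.of_mem_zip hab).1
    exact hflatmem a (List.mem_of_mem_take hmem)

-- ===== VERDICT (by name: the statement is the Claim_ definition above) =====
theorem lexicographically_largest_string_spec : Claim_equal_lexicographically_largest_string := by
  intro N K M S P hDom hPre
  unfold Spec_lexicographically_largest_string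
  by_cases hM : M ≤ 0
  · have hB : lexicographically_largest_string_alt N K M S P = S := by
      simp only [lexicographically_largest_string_alt]
      rw [if_pos (Or.inl hM)]
    rw [hB]
    simp only [lexicographically_largest_string]
    by_cases hnil : PySem.List.sorted ((P.filter pvIsPrime).map (fun p => p - 1)) (fun x => x) false = []
    · rw [if_pos (Or.inl hnil)]
      simp
    · by_cases hM0 : M = 0
      · rw [if_pos (Or.inr hM0)]
        simp
      · rw [if_neg (not_or.mpr ⟨hnil, hM0⟩)]
        rw [PySem.List.pyRange_one_eq_nil (le_trans (min_le_left _ _) hM)]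
        simp
  · push_neg at hM
    have hall : ∀ p ∈ P, p.toNat.Prime → p ≤ (S.toList.length : Int) :=
      hPre.resolve_left (by omega)
    have hDomS : ∀ c ∈ S.toList, c.toNat ≤ 127 := by
      simp only [Dom_lexicographically_largest_string, Bool.and_eq_true] at hDom
      have hsd := hDom.1.2
      unfold pvDomStr at hsd
      rw [List.all_eq_true] at hsd
      intro c hcm
      have hdc := hsd c hcm
      unfold pvDomChar at hdc
      simp at hdc
      omega
    by_cases hn2 : (S.toList.length : Int) < 2
    · have hPf : P.filter pvIsPrime = [] := by
        rw [List.filter_eq_nil_iff]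
        intro p hp ht
        have h2 := pvIsPrime_two_le p ht
        have := hall p hp ((pvIsPrime_iff p).mp ht)
        omega
      have hB : lexicographically_largest_string_alt N K M S P = S := by
        simp only [lexicographically_largest_string_alt]
        rw [if_pos (Or.inr hn2)]
      rw [hB]
      simp only [lexicographically_largest_string, hPf]
      rw [if_pos (Or.inl (by simp [PySem.List.sorted_eq_nil_iff]))]
      simp
    · have hmain := pvMain N K M S.toList P hDomS hM (by omega) hall
      rwa [String.ofList_toList] at hmain
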